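-- pv_equiv track=rewrite | github.com/Glassar/dd2394-Security-Project | e91/key_reconciliation.py | binary_search_error
-- ===== SOURCE A (Python) =====
-- def parity(block):
--     return sum(block) % 2
--
-- def binary_search_error(alice_block, bob_block):
--     start, end = 0, len(alice_block) - 1
--     while start < end:
--         mid = (start + end) // 2
--         if parity(alice_block[:mid+1]) != parity(bob_block[:mid+1]):
--             end = mid
--         else:
--             start = mid + 1
--     return start
-- ===== SOURCE B (Python) =====
-- def binary_search_error(alice_block, bob_block):
--     # Precompute, in one pass, whether each prefix has mismatched parity
--     # (running XOR of both streams), then binary-search with O(1) tests.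
--     nb = len(bob_block)
--     d = []
--     p = 0
--     for i, x in enumerate(alice_block):
--         p = (p + x + (bob_block[i] if i < nb else 0)) % 2
--         d.append(p == 1)
--
--     def rec(lo, hi):
--         if lo >= hi:
--             return lo
--         mid = (lo + hi) // 2
--         return rec(lo, mid) if d[mid] else rec(mid + 1, hi)
--
--     return rec(0, len(alice_block) - 1)
-- ===== Notes on version B (the rewrite author's own statement) =====
-- stated objective: alternative
-- what changed: B precomputes a running prefix parity-mismatch array in one pass so each binary-search probe is an O(1) array lookup instead of summing a prefix (O(n log n) -> O(n)), and runs the search as a recursion over that array; intended as faster, measured between 1.3x and 1.8x at the largest size across runs, so not claimed unconditionally.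
import Mathlib
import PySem

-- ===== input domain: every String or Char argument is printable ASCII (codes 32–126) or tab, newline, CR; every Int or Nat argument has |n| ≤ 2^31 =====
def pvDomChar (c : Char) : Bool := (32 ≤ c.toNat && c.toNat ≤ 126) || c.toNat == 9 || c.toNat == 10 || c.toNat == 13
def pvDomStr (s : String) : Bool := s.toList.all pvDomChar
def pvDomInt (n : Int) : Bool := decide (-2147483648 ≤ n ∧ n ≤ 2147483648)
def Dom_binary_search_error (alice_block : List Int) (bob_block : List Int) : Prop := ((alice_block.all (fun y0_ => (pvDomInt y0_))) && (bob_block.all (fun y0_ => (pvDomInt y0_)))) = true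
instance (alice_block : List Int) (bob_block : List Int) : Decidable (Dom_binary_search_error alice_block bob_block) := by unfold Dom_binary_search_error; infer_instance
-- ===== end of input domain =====

-- B replaces A's per-probe prefix sums with a one-pass prefix parity-mismatch array,
-- so each binary-search probe is a single array lookup (objective: alternative algorithm).

-- ===== PORT A =====
-- parity(block) = sum(block) % 2
def pyParity (block : List Int) : Int := PySem.Int.mod block.sum 2

-- the while loop of A: state (start, end)
def bseLoopA (a b : List Int) (s e : Int) : Int :=
  if h : s < e then
    let mid := PySem.Int.floordiv (s + e) 2
    if pyParity (PySem.List.slice a none (some (mid + 1))) ≠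
       pyParity (PySem.List.slice b none (some (mid + 1))) then
      bseLoopA a b s mid
    else
      bseLoopA a b (mid + 1) e
  else s
termination_by (e - s).toNat
decreasing_by
  all_goals rw [PySem.Int.floordiv_eq_ediv_of_pos (show (0:Int) < 2 by norm_num)]; omega

def binary_search_error (alice_block : List Int) (bob_block : List Int) : Int :=
  bseLoopA alice_block bob_block 0 ((alice_block.length : Int) - 1)

-- ===== PORT B =====
-- the `for i, x in enumerate(alice_block)` pass building d (append = cons at the front of the rest)
def buildD (b : List Int) (i : Nat) (p : Int) : List Int → List Bool
  | [] => []
  | x :: xs =>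
    let p' := PySem.Int.mod (p + x + (if (i : Int) < (b.length : Int) then (PySem.List.pyGet? b (i : Int)).getD 0 else 0)) 2
    (p' == 1) :: buildD b (i + 1) p' xs

-- rec(lo, hi); the index mid is always in range of d (0 ≤ lo ≤ mid < hi ≤ len d - 1), so the
-- `.getD false` default is never used
def bseRecB (d : List Bool) (lo hi : Int) : Int :=
  if h : lo < hi then
    let mid := PySem.Int.floordiv (lo + hi) 2
    if (PySem.List.pyGet? d mid).getD false then bseRecB d lo mid else bseRecB d (mid + 1) hi
  else lo
termination_by (hi - lo).toNat
decreasing_by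
  all_goals rw [PySem.Int.floordiv_eq_ediv_of_pos (show (0:Int) < 2 by norm_num)]; omega

def binary_search_error_alt (alice_block : List Int) (bob_block : List Int) : Int :=
  bseRecB (buildD bob_block 0 0 alice_block) 0 ((alice_block.length : Int) - 1)

-- ===== PRECONDITION & SPEC =====
def Spec_binary_search_error (alice_block : List Int) (bob_block : List Int) (out : Int) : Prop := out = binary_search_error_alt alice_block bob_block
instance (alice_block : List Int) (bob_block : List Int) (out : Int) : Decidable (Spec_binary_search_error alice_block bob_block out) := by unfold Spec_binary_search_error; infer_instance

-- ===== CLAIM (what is proved, stated in full; the proofs are below) =====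
def Claim_equal_binary_search_error : Prop := ∀ (alice_block : List Int) (bob_block : List Int), Dom_binary_search_error alice_block bob_block → Spec_binary_search_error alice_block bob_block (binary_search_error alice_block bob_block)

-- ===== LEMMAS AND PROOFS =====

theorem buildD_length (b : List Int) (a : List Int) (i0 : Nat) (p0 : Int) :
    (buildD b i0 p0 a).length = a.length := by
  induction a generalizing i0 p0 with
  | nil => rfl
  | cons x xs ih => simp [buildD, ih]

-- the guarded b[i] term of buildD equals the sum of the one-element slice b[i0:i0+1]
theorem ifTerm_eq_take_one (b : List Int) (i0 : Nat) :
    (if (i0 : Int) < (b.length : Int) then (PySem.List.pyGet? b (i0 : Int)).getD 0 else 0) =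
      ((b.drop i0).take 1).sum := by
  by_cases hb' : i0 < b.length
  · rw [if_pos (by exact_mod_cast hb'), PySem.List.pyGet?_natCast,
      List.getElem?_eq_getElem hb']
    simp [List.take_one_drop_eq_of_lt_length hb']
  · rw [if_neg (by exact_mod_cast hb')]
    simp [List.drop_eq_nil_of_le (show b.length ≤ i0 by omega)]

-- characterization of buildD: entry j holds iff the combined prefix sum (a up to j, b from i0) is odd
theorem buildD_getElem (b : List Int) (a : List Int) (i0 : Nat) (p0 : Int)
    (j : Nat) (hj : j < a.length) :
    (buildD b i0 p0 a)[j]'(by rw [buildD_length]; exact hj) =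
    (PySem.Int.mod (p0 + (a.take (j+1)).sum + ((b.drop i0).take (j+1)).sum) 2 == 1) := by
  induction a generalizing i0 p0 j with
  | nil => simp at hj
  | cons x xs ih =>
    cases j with
    | zero =>
      simp only [buildD, List.getElem_cons_zero, List.take_succ_cons, List.take_zero,
        List.sum_cons, List.sum_nil]
      congr 1
      rw [ifTerm_eq_take_one b i0]
      ring_nf
    | succ k =>
      simp only [buildD, List.getElem_cons_succ]
      rw [ih (i0 + 1) _ k (by simpa using hj)]
      congr 1
      have hdrop : (b.drop i0).take (k + 1 + 1) =
          (b.drop i0).take 1 ++ (b.drop (i0 + 1)).take (k + 1) := by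
        rw [← List.drop_drop, ← List.take_add]
        congr 1
        omega
      have hmod : ∀ m y : Int, PySem.Int.mod (PySem.Int.mod m 2 + y) 2 = PySem.Int.mod (m + y) 2 := by
        intro m y
        simp only [PySem.Int.mod_eq_emod_of_pos (show (0:Int) < 2 by norm_num)]
        omega
      rw [add_assoc, hmod, hdrop, ifTerm_eq_take_one b i0]
      simp only [List.take_succ_cons, List.sum_cons, List.sum_append]
      ring_nf

-- parity mismatch on two lists ↔ the combined sum is odd
theorem parity_ne_iff (x y : List Int) :
    (pyParity x ≠ pyParity y) ↔ PySem.Int.mod (x.sum + y.sum) 2 = 1 := by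
  simp only [pyParity, PySem.Int.mod_eq_emod_of_pos (show (0:Int) < 2 by norm_num)]
  omega

-- python slice xs[:i] for 0 ≤ i is take
theorem slice_to_nonneg (xs : List Int) (i : Int) (hi : 0 ≤ i) :
    PySem.List.slice xs none (some i) = xs.take i.toNat := by
  obtain ⟨n, rfl⟩ : ∃ n : Nat, i = (n : Int) := ⟨i.toNat, by omega⟩
  simp [PySem.List.slice_to_natCast]

-- the two searches agree once the probe answers agree on all in-range indices
theorem loops_eq (a b : List Int) (d : List Bool) (hd : d.length = a.length)
    (hprobe : ∀ j : Nat, (hjd : j < d.length) →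
      ((pyParity (PySem.List.slice a none (some ((j : Int) + 1))) ≠
        pyParity (PySem.List.slice b none (some ((j : Int) + 1)))) ↔ d[j]'hjd = true))
    (s e : Int) (hs : 0 ≤ s) (he : e ≤ (a.length : Int) - 1) :
    bseLoopA a b s e = bseRecB d s e := by
  by_cases h : s < e
  · rw [bseLoopA, bseRecB, dif_pos h, dif_pos h]
    have hmid : PySem.Int.floordiv (s + e) 2 = (s + e) / 2 :=
      PySem.Int.floordiv_eq_ediv_of_pos (by norm_num)
    simp only [hmid]
    obtain ⟨n, hn⟩ : ∃ n : Nat, (s + e) / 2 = (n : Int) := ⟨((s + e) / 2).toNat, by omega⟩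
    rw [hn]
    have hlen : n < d.length := by omega
    have hget : (PySem.List.pyGet? d (n : Int)).getD false = d[n]'hlen := by
      rw [PySem.List.pyGet?_natCast]
      simp [List.getElem?_eq_getElem hlen]
    have hp := hprobe n hlen
    rw [hget]
    by_cases hcond : pyParity (PySem.List.slice a none (some ((n : Int) + 1))) ≠
        pyParity (PySem.List.slice b none (some ((n : Int) + 1)))
    · rw [if_pos hcond, if_pos (hp.mp hcond)]
      exact loops_eq a b d hd hprobe s (n : Int) hs (by omega)
    · rw [if_neg hcond, if_neg (by intro hcontra; exact hcond (hp.mpr hcontra))]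
      exact loops_eq a b d hd hprobe ((n : Int) + 1) e (by omega) he
  · rw [bseLoopA, bseRecB, dif_neg h, dif_neg h]
termination_by (e - s).toNat
decreasing_by
  all_goals omega

-- ===== VERDICT (by name: the statement is the Claim_ definition above) =====
theorem binary_search_error_spec : Claim_equal_binary_search_error := by
  intro a b _
  unfold Spec_binary_search_error binary_search_error binary_search_error_alt
  refine loops_eq a b _ (buildD_length b a 0 0) ?_ 0 ((a.length : Int) - 1) le_rfl le_rfl
  intro j hjd
  have hj : j < a.length := by rw [← buildD_length b a 0 0]; exact hjd
  rw [buildD_getElem b a 0 0 j hj, slice_to_nonneg a _ (by omega), slice_to_nonneg b _ (by omega)]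
  have ht : ((j : Int) + 1).toNat = j + 1 := by omega
  rw [ht]
  simp only [List.drop_zero, zero_add, beq_iff_eq]
  exact parity_ne_iff _ _
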